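-- pv_equiv track=rewrite | github.com/luisalvaradoar/olimpiada.ct | 2017.4/2017.4.py | Roller_coasters
-- ===== SOURCE A (Python) =====
-- def Roller_coasters(vueltas, limite, pasajeros):
--     dinero = 0
--     for i in range(vueltas):
--         carro = []
--
--         for j in pasajeros:
--             if (sum(carro) + j) <= limite:
--                 carro.append(j)
--             else:
--                 break
--
--         pasajeros = pasajeros[len(carro):len(pasajeros)]
--
--         for c in carro:
--             pasajeros.append(c)
--
--         dinero += sum(carro)
--
--     return(dinero)
-- ===== SOURCE B (Python) =====
-- def Roller_coasters(vueltas, limite, pasajeros):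
--     # The queue only ever rotates, so each round is determined by an offset into
--     # the original list; memoise each offset's (round revenue, next offset) so a
--     # round at an already-seen offset costs O(1) instead of rescanning the queue.
--     n = len(pasajeros)
--     if n == 0:
--         return 0
--     memo = {}
--     dinero = 0
--     off = 0
--     for _ in range(vueltas):
--         if off not in memo:
--             s = 0
--             k = 0
--             while k < n:
--                 j = pasajeros[(off + k) % n]
--                 if s + j <= limite:
--                     s += j
--                     k += 1
--                 else:
--                     break
--             memo[off] = (s, (off + k) % n)
--         s, off2 = memo[off]
--         dinero += s
--         off = off2
--     return dinero
-- ===== Notes on version B (the rewrite author's own statement) =====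
-- stated objective: faster
-- what changed: A re-simulates the queue every round, rebuilding the greedy carro and physically rotating the list; B observes that the queue state is always a cyclic rotation of the original list, keys each round by its offset, and memoises (round revenue, next offset) per offset, so every round at an already-visited offset costs O(1) instead of an O(n) rescan.
import Mathlib
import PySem

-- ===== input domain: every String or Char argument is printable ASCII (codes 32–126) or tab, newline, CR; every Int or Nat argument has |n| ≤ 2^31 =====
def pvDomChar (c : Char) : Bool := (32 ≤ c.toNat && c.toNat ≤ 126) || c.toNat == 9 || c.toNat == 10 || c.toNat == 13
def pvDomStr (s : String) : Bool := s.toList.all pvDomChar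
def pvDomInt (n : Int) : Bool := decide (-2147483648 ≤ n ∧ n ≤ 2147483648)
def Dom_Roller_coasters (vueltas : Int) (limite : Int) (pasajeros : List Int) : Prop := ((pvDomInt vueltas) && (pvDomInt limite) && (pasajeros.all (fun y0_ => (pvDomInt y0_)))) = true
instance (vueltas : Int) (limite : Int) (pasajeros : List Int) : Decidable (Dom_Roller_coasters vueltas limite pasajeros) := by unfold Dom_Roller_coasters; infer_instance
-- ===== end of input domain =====

-- B replaces A's per-round rescans of the queue by a once-precomputed per-offset
-- (revenue, next-offset) table over the cyclically rotating queue: objective = faster.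

-- ===== PORT A =====
-- inner 'for j in pasajeros: if sum(carro)+j<=limite: carro.append(j) else: break'
def pvBuildCarro (limite : Int) : List Int → List Int → List Int
  | [], carro => carro
  | j :: rest, carro =>
    if carro.sum + j ≤ limite then pvBuildCarro limite rest (carro ++ [j]) else carro

-- outer 'for i in range(vueltas)'
def pvRoundsA (limite : Int) : Nat → List Int → Int → Int
  | 0, _, dinero => dinero
  | m + 1, pasajeros, dinero =>
    let carro := pvBuildCarro limite pasajeros []
    let pasajeros' :=
      PySem.List.slice pasajeros (some (carro.length : Int)) (some (pasajeros.length : Int))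
        ++ carro
    pvRoundsA limite m pasajeros' (dinero + carro.sum)

def Roller_coasters (vueltas : Int) (limite : Int) (pasajeros : List Int) : Int :=
  pvRoundsA limite vueltas.toNat pasajeros 0

-- ===== PORT B =====
-- 'while k < n: j = pasajeros[(off+k)%n]; …' — recursion on r = n - k; the index
-- (off+k)%n is always in range, so getD's default 0 is never read (exact).
def pvScan (limite : Int) (pas : List Int) (n off : Nat) : Nat → Nat → Int → Int × Nat
  | 0, k, s => (s, (off + k) % n)
  | r + 1, k, s =>
    let j := pas.getD ((off + k) % n) 0
    if s + j ≤ limite then pvScan limite pas n off r (k + 1) (s + j) else (s, (off + k) % n)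

-- 'for _ in range(vueltas): if off not in memo: memo[off] = …; s, off2 = memo[off]; …'
-- after the conditional insert the key off is always present, so getD's default is never read (exact)
def pvRoundsB (limite : Int) (pas : List Int) (n : Nat) :
    Nat → PySem.Dict Nat (Int × Nat) → Nat → Int → Int
  | 0, _, _, dinero => dinero
  | m + 1, memo, off, dinero =>
    let memo' := if memo.contains off = false
      then memo.insert off (pvScan limite pas n off n 0 0)
      else memo
    let p2 := (memo'.get? off).getD (0, 0)
    pvRoundsB limite pas n m memo' p2.2 (dinero + p2.1)

def Roller_coasters_alt (vueltas : Int) (limite : Int) (pasajeros : List Int) : Int :=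
  let n := pasajeros.length
  if n = 0 then 0
  else pvRoundsB limite pasajeros n vueltas.toNat PySem.Dict.empty 0 0

-- ===== PRECONDITION & SPEC =====
def Spec_Roller_coasters (vueltas : Int) (limite : Int) (pasajeros : List Int) (out : Int) : Prop := out = Roller_coasters_alt vueltas limite pasajeros
instance (vueltas : Int) (limite : Int) (pasajeros : List Int) (out : Int) : Decidable (Spec_Roller_coasters vueltas limite pasajeros out) := by unfold Spec_Roller_coasters; infer_instance

-- ===== CLAIM (what is proved, stated in full; the proofs are below) =====
def Claim_equal_Roller_coasters : Prop := ∀ (vueltas : Int) (limite : Int) (pasajeros : List Int), Dom_Roller_coasters vueltas limite pasajeros → Spec_Roller_coasters vueltas limite pasajeros (Roller_coasters vueltas limite pasajeros)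

-- ===== LEMMAS AND PROOFS =====

-- greedy prefix with running sum only (proof-side reformulation of the carro loop)
def pvGoS (limite : Int) : List Int → Int → List Int
  | [], _ => []
  | j :: rest, s => if s + j ≤ limite then j :: pvGoS limite rest (s + j) else []

theorem pvBuildCarro_acc (limite : Int) :
    ∀ (rest carro : List Int),
      pvBuildCarro limite rest carro = carro ++ pvGoS limite rest carro.sum := by
  intro rest
  induction rest with
  | nil => intro carro; simp [pvBuildCarro, pvGoS]
  | cons j rest ih =>
    intro carro
    by_cases h : carro.sum + j ≤ limite
    · simp [pvBuildCarro, pvGoS, h, ih]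
    · simp [pvBuildCarro, pvGoS, h]

theorem pvGoS_prefix (limite : Int) :
    ∀ (l : List Int) (s : Int), pvGoS limite l s = l.take (pvGoS limite l s).length := by
  intro l
  induction l with
  | nil => intro s; simp [pvGoS]
  | cons j rest ih =>
    intro s
    by_cases h : s + j ≤ limite
    · simp only [pvGoS, if_pos h, List.length_cons, List.take_succ_cons]
      exact congrArg (j :: ·) (ih (s + j))
    · simp [pvGoS, h]

theorem pvGoS_length_le (limite : Int) :
    ∀ (l : List Int) (s : Int), (pvGoS limite l s).length ≤ l.length := by
  intro l
  induction l with
  | nil => intro s; simp [pvGoS]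
  | cons j rest ih =>
    intro s
    by_cases h : s + j ≤ limite
    · simp only [pvGoS, if_pos h, List.length_cons]
      exact Nat.succ_le_succ (ih (s + j))
    · simp [pvGoS, h]

-- pvScan computes the sum and next offset of the greedy prefix of the rotated queue
theorem pvScan_eq_goS (limite : Int) (p : List Int) (off : Nat) :
    ∀ (r k : Nat) (s : Int), k + r = p.length →
      pvScan limite p p.length off r k s =
        (s + (pvGoS limite ((p.rotate off).drop k) s).sum,
         (off + (k + (pvGoS limite ((p.rotate off).drop k) s).length)) % p.length) := by
  intro r
  induction r with
  | zero =>
    intro k s hk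
    have hk' : k = p.length := by omega
    have hdrop : (p.rotate off).drop k = [] := by
      apply List.drop_eq_nil_of_le
      rw [List.length_rotate]; omega
    subst hk'
    simp [pvScan, hdrop, pvGoS, Nat.add_mod_right]
  | succ r ih =>
    intro k s hk
    have hkl : k < (p.rotate off).length := by rw [List.length_rotate]; omega
    have hdrop : (p.rotate off).drop k = (p.rotate off)[k] :: (p.rotate off).drop (k + 1) :=
      (List.getElem_cons_drop hkl).symm
    have hget : (p.rotate off)[k] = p[(off + k) % p.length]'(by
        apply Nat.mod_lt; omega) := by
      rw [List.getElem_rotate]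
      congr 1
      rw [Nat.add_comm]
    have hgetD : p.getD ((off + k) % p.length) 0 = (p.rotate off)[k] := by
      rw [hget, List.getD_eq_getElem]
    by_cases h : s + p.getD ((off + k) % p.length) 0 ≤ limite
    · have h' : s + (p.rotate off)[k] ≤ limite := by rwa [hgetD] at h
      rw [pvScan, if_pos h, ih (k + 1) (s + p.getD ((off + k) % p.length) 0) (by omega)]
      rw [hdrop]
      simp only [pvGoS, if_pos h', hgetD, List.sum_cons, List.length_cons, Prod.mk.injEq]
      constructor
      · ring
      · congr 1; omega
    · have h' : ¬ s + (p.rotate off)[k] ≤ limite := by rwa [hgetD] at h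
      rw [pvScan, if_neg h, hdrop]
      simp only [pvGoS, if_neg h', List.sum_nil, List.length_nil]
      simp

-- the slice pasajeros[len(carro):len(pasajeros)] is just drop
theorem slice_eq_drop (xs : List Int) (a : Nat) :
    PySem.List.slice xs (some (a : Int)) (some (xs.length : Int)) = xs.drop a := by
  rw [PySem.List.slice_natCast]
  apply List.take_of_length_le
  simp

-- A's loop on a rotated queue equals B's memoised loop on the offset
theorem rounds_eq (limite : Int) (p : List Int) (hp : 0 < p.length) :
    ∀ (m : Nat) (off : Nat) (d : Int) (memo : PySem.Dict Nat (Int × Nat)),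
      off < p.length →
      (∀ o v, memo.get? o = some v → v = pvScan limite p p.length o p.length 0 0) →
      pvRoundsA limite m (p.rotate off) d = pvRoundsB limite p p.length m memo off d := by
  intro m
  induction m with
  | zero => intro off d memo _ _; simp [pvRoundsA, pvRoundsB]
  | succ m ih =>
    intro off d memo hoff hinv
    have hscan := pvScan_eq_goS limite p off p.length 0 0 (by omega)
    simp only [List.drop_zero, zero_add] at hscan
    set c := pvGoS limite (p.rotate off) 0 with hc
    have hcarro : pvBuildCarro limite (p.rotate off) [] = c := by
      rw [pvBuildCarro_acc]; simp [hc]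
    have hlenle : c.length ≤ p.length := by
      have := pvGoS_length_le limite (p.rotate off) 0
      simpa [List.length_rotate, ← hc] using this
    set memo' := if memo.contains off = false
      then memo.insert off (pvScan limite p p.length off p.length 0 0)
      else memo with hm'
    have hinv' : ∀ o v, memo'.get? o = some v → v = pvScan limite p p.length o p.length 0 0 := by
      intro o v hv
      rw [hm'] at hv
      by_cases hcont : memo.contains off = false
      · rw [if_pos hcont, PySem.Dict.get?_insert] at hv
        by_cases ho : o = off
        · rw [if_pos ho] at hv; cases hv; rw [ho]
        · rw [if_neg ho] at hv; exact hinv o v hv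
      · rw [if_neg hcont] at hv; exact hinv o v hv
    have hlook : memo'.get? off = some (pvScan limite p p.length off p.length 0 0) := by
      rw [hm']
      by_cases hcont : memo.contains off = false
      · rw [if_pos hcont]; exact PySem.Dict.get?_insert_self ..
      · rw [if_neg hcont]
        have : (memo.get? off).isSome := by
          rw [← PySem.Dict.contains_eq_isSome_get?]
          simpa using hcont
        obtain ⟨v, hv⟩ := Option.isSome_iff_exists.mp this
        rw [hv, hinv off v hv]
    have hrot : (p.rotate off).drop c.length ++ c = p.rotate ((off + c.length) % p.length) := by
      have hpref : (p.rotate off).take c.length = c := by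
        conv_rhs => rw [hc, pvGoS_prefix limite (p.rotate off) 0, ← hc]
      have hsplit := List.rotate_eq_drop_append_take
        (l := p.rotate off) (n := c.length) (by rw [List.length_rotate]; exact hlenle)
      rw [hpref] at hsplit
      rw [← hsplit, List.rotate_rotate, List.rotate_mod]
    simp only [pvRoundsA, hcarro]
    rw [pvRoundsB, ← hm', hlook]
    simp only [Option.getD_some, hscan]
    rw [slice_eq_drop, hrot]
    exact ih ((off + c.length) % p.length) (d + c.sum) memo' (Nat.mod_lt _ hp) hinv'

theorem roundsA_nil (limite : Int) : ∀ (m : Nat) (d : Int), pvRoundsA limite m [] d = d := by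
  intro m
  induction m with
  | zero => intro d; simp [pvRoundsA]
  | succ m ih =>
    intro d
    rw [pvRoundsA]
    simp [pvBuildCarro, PySem.List.slice, ih]

-- ===== VERDICT (by name: the statement is the Claim_ definition above) =====
theorem Roller_coasters_spec : Claim_equal_Roller_coasters := by
  intro vueltas limite pasajeros _
  unfold Spec_Roller_coasters Roller_coasters Roller_coasters_alt
  by_cases h : pasajeros.length = 0
  · rw [if_pos h]
    have : pasajeros = [] := List.eq_nil_of_length_eq_zero h
    rw [this, roundsA_nil]
  · rw [if_neg h]
    have hp : 0 < pasajeros.length := Nat.pos_of_ne_zero h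
    have := rounds_eq limite pasajeros hp vueltas.toNat 0 0 PySem.Dict.empty hp
      (by intro o v hv; simp [PySem.Dict.get?_empty] at hv)
    simpa using this
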